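-- pv_equiv track=rewrite | github.com/ulf1/treesimi | treesimi/extract.py | extract_subtrees
-- ===== SOURCE A (Python) =====
-- from typing import List, Tuple, Union, Optional
--
-- DATA = Union[int, float, str, dict, list, tuple]
--
-- def extract_subtrees(nested: List[Tuple[int, int, int, DATA]]
--                      ) -> List[List[Tuple[int, int, int, DATA]]]:
--     """Extracting full subtrees from a nested set tables is
--         basically O(n) copy & paste
--
--     Parameters:
--     -----------
--     nested : List[Tuple[int, int, int, int, DATA]]
--         Nested set table of the tree. The columns contain the following
--           information:
--             0: Left value (root is 1)
--             1: Right value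
--             2: Depth level (root is 0)
--             3: Attributes related to the node ID
--         Please note, that you need to remove the node IDs beforehand,
--           e.g. use `treesimi.remove_node_ids`
--
--     Returns:
--     --------
--     List[List[Tuple[int, int, int, DATA]]]
--         A list of nested set based trees
--
--     Example:
--     --------
--         import treesimi as ts
--         nested = [[1, 1, 8, 0, 'a'], [2, 2, 5, 1, 'b'],
--                   [4, 3, 4, 2, 'd'], [3, 6, 7, 1, 'c']]
--         nested = ts.remove_node_ids(nested)
--         subtrees = ts.extract_subtrees(nested)
--     """
--     subtrees = []
--     for lft0, rgt0, dep0, _ in nested: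
--         subtrees.append(
--             [[lfti - lft0 + 1, rgti - lft0 + 1, depi - dep0, attr]
--              for lfti, rgti, depi, attr in nested
--              if (lfti >= lft0) and (rgti <= rgt0)])
--     return subtrees
-- ===== SOURCE B (Python) =====
-- def extract_subtrees(nested):
--     # Scatter pass: roots sorted by left value; each node is appended to the
--     # bucket of every root whose interval admits it, breaking once lft0 > lft.
--     n = len(nested)
--     roots = sorted(range(n), key=lambda k: nested[k][0])
--     buckets = [[] for _ in nested]
--     for lft, rgt, dep, attr in nested:
--         for k in roots:
--             lft0, rgt0, dep0, _ = nested[k]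
--             if lft0 > lft:
--                 break
--             if rgt <= rgt0:
--                 buckets[k].append([lft - lft0 + 1, rgt - lft0 + 1, dep - dep0, attr])
--     return buckets
-- ===== Notes on version B (the rewrite author's own statement) =====
-- stated objective: alternative
-- what changed: A gathers each subtree by re-scanning the whole table for every root; B makes one scatter pass over the nodes, appending each node to the buckets of the roots presorted by left value with an early break once lft0 exceeds the node's lft.
import Mathlib
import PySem

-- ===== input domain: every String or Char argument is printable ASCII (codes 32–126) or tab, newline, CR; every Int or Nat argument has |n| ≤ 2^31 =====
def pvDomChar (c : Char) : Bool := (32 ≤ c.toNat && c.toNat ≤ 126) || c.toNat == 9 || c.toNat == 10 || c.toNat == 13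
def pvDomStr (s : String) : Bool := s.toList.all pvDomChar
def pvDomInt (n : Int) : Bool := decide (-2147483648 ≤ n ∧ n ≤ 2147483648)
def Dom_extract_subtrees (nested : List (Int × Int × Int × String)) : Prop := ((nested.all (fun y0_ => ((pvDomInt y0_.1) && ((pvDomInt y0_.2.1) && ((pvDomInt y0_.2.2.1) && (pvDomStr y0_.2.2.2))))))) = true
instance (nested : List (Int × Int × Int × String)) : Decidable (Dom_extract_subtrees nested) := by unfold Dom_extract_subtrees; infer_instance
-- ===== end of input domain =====

-- B replaces A's per-root gather (a full scan of the table for every root) by one scatter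
-- pass over the nodes that appends each node to the buckets of the roots sorted by left
-- value, stopping the root scan early once lft0 > lft (objective: alternative algorithm).

-- ===== PORT A =====
-- A: for every root row y, a comprehension over all rows x keeping those with
-- x.lft >= y.lft and x.rgt <= y.rgt, rebased to y.
def extract_subtrees (nested : List (Int × Int × Int × String)) : List (List (Int × Int × Int × String)) :=
  nested.foldl (fun subtrees y =>
    subtrees ++ [nested.foldl (fun acc x =>
      if x.1 ≥ y.1 ∧ x.2.1 ≤ y.2.1 then
        acc ++ [(x.1 - y.1 + 1, x.2.1 - y.1 + 1, x.2.2.1 - y.2.2.1, x.2.2.2)]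
      else acc) []]) []

-- ===== PORT B =====
-- Python indexes nested[k] with k drawn from range(len(nested)) (always in range), ported
-- with Nat indices and List.getD with a default row.
def pvDefRow : Int × Int × Int × String := (0, 0, 0, "")

-- the inner `for k in roots: … break` loop of Source B
def pvInner (nested : List (Int × Int × Int × String)) (x : Int × Int × Int × String) :
    List Nat → List (List (Int × Int × Int × String)) → List (List (Int × Int × Int × String))
  | [], b => b
  | k :: rest, b =>
      let y := nested.getD k pvDefRow
      if y.1 > x.1 then b
      else pvInner nested x rest
        (if x.2.1 ≤ y.2.1 then
           b.set k (b.getD k [] ++ [(x.1 - y.1 + 1, x.2.1 - y.1 + 1, x.2.2.1 - y.2.2.1, x.2.2.2)])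
         else b)

def extract_subtrees_alt (nested : List (Int × Int × Int × String)) : List (List (Int × Int × Int × String)) :=
  let roots := PySem.List.sorted (List.range nested.length) (fun k => (nested.getD k pvDefRow).1)
  let buckets := nested.map (fun _ => ([] : List (Int × Int × Int × String)))
  nested.foldl (fun b x => pvInner nested x roots b) buckets

-- ===== PRECONDITION & SPEC =====
def Spec_extract_subtrees (nested : List (Int × Int × Int × String)) (out : List (List (Int × Int × Int × String))) : Prop := out = extract_subtrees_alt nested
instance (nested : List (Int × Int × Int × String)) (out : List (List (Int × Int × Int × String))) : Decidable (Spec_extract_subtrees nested out) := by unfold Spec_extract_subtrees; infer_instance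

-- ===== CLAIM (what is proved, stated in full; the proofs are below) =====
def Claim_equal_extract_subtrees : Prop := ∀ (nested : List (Int × Int × Int × String)), Dom_extract_subtrees nested → Spec_extract_subtrees nested (extract_subtrees nested)

-- ===== LEMMAS AND PROOFS =====

def pvRebase (y x : Int × Int × Int × String) : Int × Int × Int × String :=
  (x.1 - y.1 + 1, x.2.1 - y.1 + 1, x.2.2.1 - y.2.2.1, x.2.2.2)

lemma pvInner_length (nested : List (Int × Int × Int × String)) (x : Int × Int × Int × String)
    (ks : List Nat) (b : List (List (Int × Int × Int × String))) :
    (pvInner nested x ks b).length = b.length := by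
  induction ks generalizing b with
  | nil => rfl
  | cons k rest ih =>
      simp only [pvInner]
      split
      · rfl
      · rw [ih]; split <;> simp

lemma pvInner_getD (nested : List (Int × Int × Int × String)) (x : Int × Int × Int × String)
    (ks : List Nat) (b : List (List (Int × Int × Int × String))) (k0 : Nat)
    (hmem : ∀ k ∈ ks, k < b.length)
    (hpw : ks.Pairwise (fun a c => (nested.getD a pvDefRow).1 ≤ (nested.getD c pvDefRow).1))
    (hnd : ks.Nodup) :
    (pvInner nested x ks b).getD k0 [] =
      if k0 ∈ ks ∧ x.1 ≥ (nested.getD k0 pvDefRow).1 ∧ x.2.1 ≤ (nested.getD k0 pvDefRow).2.1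
      then b.getD k0 [] ++ [pvRebase (nested.getD k0 pvDefRow) x]
      else b.getD k0 [] := by
  induction ks generalizing b with
  | nil => simp [pvInner]
  | cons k rest ih =>
      simp only [pvInner]
      rcases List.pairwise_cons.mp hpw with ⟨hhead, hpw'⟩
      rcases List.nodup_cons.mp hnd with ⟨hk, hnd'⟩
      split
      · -- break: (nested.getD k).1 > x.1
        rename_i hbr
        rw [if_neg]
        rintro ⟨hin, hge, -⟩
        rcases List.mem_cons.mp hin with rfl | hin'
        · omega
        · have := hhead k0 hin'; omega
      · rename_i hbr
        rw [not_lt] at hbr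
        rw [ih _ (by intro j hj; have := hmem j (List.mem_cons_of_mem _ hj); split <;> simpa using this) hpw' hnd']
        by_cases hk0 : k0 = k
        · subst hk0
          have hlt : k0 < b.length := hmem k0 (List.mem_cons_self)
          rw [if_neg (fun h => hk h.1)]
          by_cases hr : x.2.1 ≤ (nested.getD k0 pvDefRow).2.1
          · rw [if_pos hr, if_pos ⟨List.mem_cons_self, by omega, hr⟩,
                List.getD_eq_getElem _ _ (by simpa using hlt), List.getElem_set_self,
                List.getD_eq_getElem _ _ hlt, pvRebase]
          · rw [if_neg hr, if_neg (by rintro ⟨-, -, h⟩; exact hr h)]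
        · have hset : ∀ v, (b.set k v).getD k0 [] = b.getD k0 [] := by
            intro v
            by_cases hlt0 : k0 < b.length
            · rw [List.getD_eq_getElem _ _ (by simpa using hlt0),
                  List.getElem_set_ne (by omega), List.getD_eq_getElem _ _ hlt0]
            · rw [List.getD_eq_default _ _ (by simpa using Nat.le_of_not_lt hlt0),
                  List.getD_eq_default _ _ (Nat.le_of_not_lt hlt0)]
          have hb' : (if x.2.1 ≤ (nested.getD k pvDefRow).2.1
              then b.set k (b.getD k [] ++ [(x.1 - (nested.getD k pvDefRow).1 + 1,
                x.2.1 - (nested.getD k pvDefRow).1 + 1,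
                x.2.2.1 - (nested.getD k pvDefRow).2.2.1, x.2.2.2)]) else b).getD k0 [] = b.getD k0 [] := by
            split
            · exact hset _
            · rfl
          rw [hb']
          by_cases hin : k0 ∈ rest
          · by_cases hc : x.1 ≥ (nested.getD k0 pvDefRow).1 ∧ x.2.1 ≤ (nested.getD k0 pvDefRow).2.1
            · rw [if_pos ⟨hin, hc⟩, if_pos ⟨List.mem_cons_of_mem _ hin, hc⟩]
            · rw [if_neg (by rintro ⟨-, h⟩; exact hc h), if_neg (by rintro ⟨-, h⟩; exact hc h)]
          · rw [if_neg (by rintro ⟨h, -⟩; exact hin h),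
                if_neg (by rintro ⟨h, -⟩; rcases List.mem_cons.mp h with h | h; exact hk0 h; exact hin h)]

lemma pvOuter_length (nested : List (Int × Int × Int × String)) (roots : List Nat)
    (rows : List (Int × Int × Int × String)) (b : List (List (Int × Int × Int × String))) :
    (rows.foldl (fun b x => pvInner nested x roots b) b).length = b.length := by
  induction rows generalizing b with
  | nil => rfl
  | cons x rest ih => simp only [List.foldl_cons]; rw [ih, pvInner_length]

lemma pvOuter_getD (nested : List (Int × Int × Int × String)) (roots : List Nat)
    (rows : List (Int × Int × Int × String)) (b : List (List (Int × Int × Int × String))) (k0 : Nat)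
    (hmem : ∀ k ∈ roots, k < b.length)
    (hpw : roots.Pairwise (fun a c => (nested.getD a pvDefRow).1 ≤ (nested.getD c pvDefRow).1))
    (hnd : roots.Nodup) (hk0 : k0 ∈ roots) :
    (rows.foldl (fun b x => pvInner nested x roots b) b).getD k0 [] =
      b.getD k0 [] ++
        (rows.filter (fun x => decide (x.1 ≥ (nested.getD k0 pvDefRow).1 ∧ x.2.1 ≤ (nested.getD k0 pvDefRow).2.1))).map
          (pvRebase (nested.getD k0 pvDefRow)) := by
  induction rows generalizing b with
  | nil => simp
  | cons x rest ih =>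
      simp only [List.foldl_cons]
      rw [ih _ (by intro j hj; rw [pvInner_length]; exact hmem j hj),
          pvInner_getD nested x roots b k0 hmem hpw hnd, List.filter_cons]
      by_cases hc : x.1 ≥ (nested.getD k0 pvDefRow).1 ∧ x.2.1 ≤ (nested.getD k0 pvDefRow).2.1
      · rw [if_pos ⟨hk0, hc⟩, if_pos (by simpa using hc)]
        simp
      · rw [if_neg (by rintro ⟨-, h⟩; exact hc h), if_neg (by simpa using hc)]

-- ===== VERDICT (by name: the statement is the Claim_ definition above) =====
theorem extract_subtrees_spec : Claim_equal_extract_subtrees := by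
  unfold Claim_equal_extract_subtrees
  intro nested _
  unfold Spec_extract_subtrees extract_subtrees extract_subtrees_alt
  have hA : ∀ y : Int × Int × Int × String,
      nested.foldl (fun acc x =>
        if x.1 ≥ y.1 ∧ x.2.1 ≤ y.2.1 then
          acc ++ [(x.1 - y.1 + 1, x.2.1 - y.1 + 1, x.2.2.1 - y.2.2.1, x.2.2.2)]
        else acc) [] =
      (nested.filter (fun x => decide (x.1 ≥ y.1 ∧ x.2.1 ≤ y.2.1))).map (pvRebase y) := by
    intro y
    have := PySem.List.foldl_append_if (fun x : Int × Int × Int × String =>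
      decide (x.1 ≥ y.1 ∧ x.2.1 ≤ y.2.1)) (pvRebase y) nested []
    simpa [pvRebase] using this
  simp only [hA, PySem.List.foldl_append_singleton_eq_map, List.nil_append]
  -- name the pieces of B
  set roots := PySem.List.sorted (List.range nested.length) (fun k => (nested.getD k pvDefRow).1) with hroots
  have hperm : roots.Perm (List.range nested.length) := PySem.List.sorted_perm ..
  have hmemr : ∀ k, k ∈ roots ↔ k < nested.length := by
    intro k; rw [hperm.mem_iff, List.mem_range]
  have hndr : roots.Nodup := hperm.nodup_iff.mpr (List.nodup_range)
  have hpwr : roots.Pairwise (fun a c => (nested.getD a pvDefRow).1 ≤ (nested.getD c pvDefRow).1) :=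
    PySem.List.sorted_pairwise (List.range nested.length) (fun k => (nested.getD k pvDefRow).1)
  apply List.ext_getElem
  · rw [List.length_map, pvOuter_length, List.length_map]
  · intro i hi1 hi2
    have hin : i < nested.length := by simpa using hi1
    have hlen0 : (nested.map (fun _ => ([] : List (Int × Int × Int × String)))).length = nested.length := by simp
    have hk0 : i ∈ roots := (hmemr i).mpr hin
    have hres : (nested.foldl (fun b x => pvInner nested x roots b)
        (nested.map (fun _ => ([] : List (Int × Int × Int × String))))).getD i [] =
        [] ++ (nested.filter (fun x => decide (x.1 ≥ (nested.getD i pvDefRow).1 ∧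
          x.2.1 ≤ (nested.getD i pvDefRow).2.1))).map (pvRebase (nested.getD i pvDefRow)) := by
      rw [pvOuter_getD nested roots nested _ i (by intro k hk; rw [hlen0]; exact (hmemr k).mp hk) hpwr hndr hk0]
      congr 1
      rw [List.getD_eq_getElem _ _ (by omega : i < (nested.map (fun _ => ([] : List (Int × Int × Int × String)))).length)]
      simp
    rw [List.getElem_map]
    rw [← List.getD_eq_getElem _ ([] : List (Int × Int × Int × String)) hi2, hres,
        List.getD_eq_getElem _ _ hin]
    simp
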